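-- pv_equiv track=rewrite | github.com/julianschelb/locisimiles | src/locisimiles/pipeline/rule_based.py | _highlight_words
-- ===== SOURCE A (Python) =====
-- from typing import Dict, List, Tuple, Set, Union, Any, Optional, Sequence
--
-- def _highlight_words(text: str, words: List[str]) -> str:
--     """Highlight matched words with **markers**."""
--     separators = ' —?!-,.()[]:;\'/""\„'
--     current_word = ''
--     result = ''
--
--     for char in text:
--         if char not in separators:
--             current_word += char
--         else:
--             if current_word.lower() in [w.lower() for w in words]:
--                 result += '**' + current_word + '**'
--             else:
--                 result += current_word
--             result += char
--             current_word = ''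
--
--     if current_word:
--         if current_word.lower() in [w.lower() for w in words]:
--             result += '**' + current_word + '**'
--         else:
--             result += current_word
--
--     return result.replace('****', '**').strip()
-- ===== SOURCE B (Python) =====
-- def _highlight_words(text, words):
--     """Highlight matched words with **markers**."""
--     seps = ' —?!-,.()[]:;\'/""\„'
--     vocab = {w.lower() for w in words}
--     # mask every separator as NUL, split once: parts are the word runs,
--     # the i-th separator of text sits right after parts[0..i]
--     table = str.maketrans({c: '\x00' for c in seps})
--     parts = text.translate(table).split('\x00')
--     out = []
--     append = out.append
--     pos = 0
--     for w in parts[:-1]: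
--         append('**' + w + '**' if w.lower() in vocab else w)
--         pos += len(w)
--         append(text[pos])
--         pos += 1
--     last = parts[-1]
--     if last:
--         append('**' + last + '**' if last.lower() in vocab else last)
--     return ''.join(out).replace('****', '**').strip()
-- ===== Notes on version B (the rewrite author's own statement) =====
-- stated objective: alternative
-- what changed: B builds the set of lowercased words once and tokenizes the text with a single str.translate (separators to NUL) plus one split, interleaving marked word parts with the separator read back at each boundary, instead of A's char-by-char accumulator that rebuilds the lowercased word list at every separator.
import Mathlib
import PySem

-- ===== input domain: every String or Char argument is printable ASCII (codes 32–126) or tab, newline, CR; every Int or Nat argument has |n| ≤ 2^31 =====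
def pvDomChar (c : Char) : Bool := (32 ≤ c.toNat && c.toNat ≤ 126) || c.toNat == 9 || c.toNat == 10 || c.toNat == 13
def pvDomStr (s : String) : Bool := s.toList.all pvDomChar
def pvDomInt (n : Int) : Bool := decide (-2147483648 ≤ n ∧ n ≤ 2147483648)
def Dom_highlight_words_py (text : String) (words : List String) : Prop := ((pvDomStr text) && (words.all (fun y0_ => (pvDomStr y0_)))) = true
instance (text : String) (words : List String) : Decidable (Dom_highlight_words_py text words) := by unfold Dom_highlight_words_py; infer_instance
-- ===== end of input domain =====

-- B builds the set of lowercased words once and tokenizes the text with one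
-- translate(sep -> NUL) + split('\x00') pass instead of A's char-by-char accumulator
-- that rebuilds the lowercased word list at every separator (objective: alternative).

-- ===== PORT A =====
-- A's separator string ' —?!-,.()[]:;\'/""\„' (the backslash before „ is literal)
def hwSeparatorsA : List Char := (" —?!-,.()[]:;'/\"\"\\„").toList

-- the `if current_word.lower() in [w.lower() for w in words]: … else: …` body
def hwWrapA (words : List String) (cur : List Char) : List Char :=
  if PySem.Chars.lower cur ∈ words.map (fun w => PySem.Chars.lower w.toList) then
    ("**".toList ++ cur) ++ "**".toList
  else cur

-- the `for char in text` loop with state (current_word, result), then the trailing guard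
def hwLoopA (words : List String) : List Char → List Char → List Char → List Char
  | [], cur, res => if cur ≠ [] then res ++ hwWrapA words cur else res
  | c :: cs, cur, res =>
    if c ∉ hwSeparatorsA then hwLoopA words cs (cur ++ [c]) res
    else hwLoopA words cs [] ((res ++ hwWrapA words cur) ++ [c])

def highlight_words_py (text : String) (words : List String) : String :=
  String.ofList (PySem.Chars.strip
    (PySem.Chars.replace (hwLoopA words text.toList [] []) ("****".toList) ("**".toList)))

-- ===== PORT B =====
-- seps = ' —?!-,.()[]:;\'/""\„'
def hwSepsB : List Char := (" —?!-,.()[]:;'/\"\"\\„").toList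

-- text.translate(str.maketrans({c: '\x00' for c in seps})): each separator becomes NUL
-- (one table entry per distinct separator char; translating is a per-char map — exact)
def hwMaskB (cs : List Char) : List Char :=
  cs.map (fun c => if c ∈ hwSepsB then '\x00' else c)

-- masked.split('\x00')  (str.split with a one-char separator, no maxsplit — exact)
def hwSplitNulB : List Char → List (List Char)
  | [] => [[]]
  | c :: cs =>
    if c = '\x00' then [] :: hwSplitNulB cs
    else
      match hwSplitNulB cs with
      | [] => [[c]]
      | p :: ps => (c :: p) :: ps

-- vocab = {w.lower() for w in words}
def hwVocabB (words : List String) : PySem.Set (List Char) :=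
  PySem.Set.ofList (words.map (fun w => PySem.Chars.lower w.toList))

-- '**' + w + '**' if w.lower() in vocab else w
def hwMarkB (vocab : PySem.Set (List Char)) (tok : List Char) : List Char :=
  if PySem.Set.contains vocab (PySem.Chars.lower tok) then
    "**".toList ++ tok ++ "**".toList
  else tok

-- the `for w in parts[:-1]` loop carrying pos, then the `if last:` guard.
-- text[pos] is always in range here (pos points at a split boundary, i.e. a real
-- character of text), so the total pyGetD with a dummy default is exact.
def hwEmitB (vocab : PySem.Set (List Char)) (text : List Char) :
    List (List Char) → Nat → List (List Char)
  | [], _ => []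
  | [last], _ => if last = [] then [] else [hwMarkB vocab last]
  | w :: q :: ps, pos =>
    hwMarkB vocab w
      :: [PySem.List.pyGetD text ((pos : Int) + (w.length : Int)) '\x00']
      :: hwEmitB vocab text (q :: ps) (pos + w.length + 1)

def highlight_words_py_alt (text : String) (words : List String) : String :=
  String.ofList (PySem.Chars.strip
    (PySem.Chars.replace
      ((hwEmitB (hwVocabB words) text.toList (hwSplitNulB (hwMaskB text.toList)) 0).flatten)
      ("****".toList) ("**".toList)))

-- ===== PRECONDITION & SPEC =====
def Spec_highlight_words_py (text : String) (words : List String) (out : String) : Prop := out = highlight_words_py_alt text words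
instance (text : String) (words : List String) (out : String) : Decidable (Spec_highlight_words_py text words out) := by unfold Spec_highlight_words_py; infer_instance

-- ===== CLAIM (what is proved, stated in full; the proofs are below) =====
def Claim_equal_highlight_words_py : Prop := ∀ (text : String) (words : List String), Dom_highlight_words_py text words → Spec_highlight_words_py text words (highlight_words_py text words)

-- ===== LEMMAS AND PROOFS =====

-- A's inner list-comprehension membership agrees with B's set lookup
lemma hw_wrap_eq_mark (words : List String) (cur : List Char) :
    hwWrapA words cur = hwMarkB (hwVocabB words) cur := by
  unfold hwWrapA hwMarkB hwVocabB
  by_cases hmem : PySem.Chars.lower cur ∈ words.map (fun w => PySem.Chars.lower w.toList)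
  · rw [if_pos hmem, if_pos (by rw [PySem.Set.contains_iff, PySem.Set.mem_ofList]; exact hmem)]
  · rw [if_neg hmem, if_neg (by rw [PySem.Set.contains_iff, PySem.Set.mem_ofList]; exact hmem)]

-- A's and B's separator literals are the same characters
lemma hw_seps_eq : hwSepsB = hwSeparatorsA := rfl

lemma hw_splitNul_no_nul (xs : List Char) (h : '\x00' ∉ xs) : hwSplitNulB xs = [xs] := by
  induction xs with
  | nil => rfl
  | cons c cs ih =>
    have hc : ¬ c = '\x00' := fun he => h (by simp [he])
    rw [hwSplitNulB, if_neg hc, ih (fun hm => h (by simp [hm]))]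

lemma hw_splitNul_append_nul (xs rest : List Char) (h : '\x00' ∉ xs) :
    hwSplitNulB (xs ++ '\x00' :: rest) = xs :: hwSplitNulB rest := by
  induction xs with
  | nil => simp [hwSplitNulB]
  | cons c cs ih =>
    have hc : ¬ c = '\x00' := fun he => h (by simp [he])
    rw [List.cons_append, hwSplitNulB, if_neg hc, ih (fun hm => h (by simp [hm]))]

lemma hw_splitNul_ne_nil (xs : List Char) : hwSplitNulB xs ≠ [] := by
  induction xs with
  | nil => simp [hwSplitNulB]
  | cons c cs ih =>
    rw [hwSplitNulB]
    split
    · simp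
    · cases h : hwSplitNulB cs with
      | nil => simp
      | cons p ps => simp

-- the separator B reads back from text at a split boundary is the character A saw
lemma hw_get_boundary (text cur cs : List Char) (c : Char) (pos : Nat)
    (hdrop : text.drop pos = cur ++ c :: cs) :
    PySem.List.pyGetD text ((pos : Int) + (cur.length : Int)) '\x00' = c := by
  have : ((pos : Int) + (cur.length : Int)) = ((pos + cur.length : Nat) : Int) := by push_cast; ring
  rw [this, PySem.List.pyGetD_natCast]
  have h1 : text[pos + cur.length]? = (text.drop pos)[cur.length]? := by
    rw [List.getElem?_drop]
  rw [List.getD, h1, hdrop, List.getElem?_append_right (Nat.le_refl _)]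
  simp

-- core invariant: A's loop on the suffix cs with pending word cur (separator- and
-- NUL-free) equals res followed by B's emitted tokens for the parts of cur ++ masked cs
lemma hw_loop_eq_emit (words : List String) (text : List Char) :
    ∀ (cs cur res : List Char) (pos : Nat),
      (∀ c ∈ cur, c ∉ hwSeparatorsA) → '\x00' ∉ cur → '\x00' ∉ cs →
      text.drop pos = cur ++ cs →
      hwLoopA words cs cur res
        = res ++ (hwEmitB (hwVocabB words) text (hwSplitNulB (cur ++ hwMaskB cs)) pos).flatten := by
  intro cs
  induction cs with
  | nil =>
    intro cur res pos hsep hnul _ _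
    rw [show hwMaskB [] = [] from rfl, List.append_nil, hw_splitNul_no_nul cur hnul]
    rw [hwLoopA, hwEmitB]
    by_cases hc : cur = []
    · simp [hc]
    · simp [hc, hw_wrap_eq_mark]
  | cons c cs ih =>
    intro cur res pos hsep hnul hnulcs hdrop
    have hnulcs' : '\x00' ∉ cs := fun hm => hnulcs (by simp [hm])
    by_cases hcsep : c ∈ hwSeparatorsA
    · -- separator: A flushes; B's current part ends here, the NUL marks the boundary
      have hmask : hwMaskB (c :: cs) = '\x00' :: hwMaskB cs := by
        simp only [hwMaskB, List.map_cons, if_pos (hw_seps_eq ▸ hcsep)]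
      rw [hmask, hw_splitNul_append_nul cur _ hnul]
      obtain ⟨q, ps, hq⟩ := List.exists_cons_of_ne_nil (hw_splitNul_ne_nil (hwMaskB cs))
      rw [hq, hwEmitB]
      have hA : hwLoopA words (c :: cs) cur res
          = hwLoopA words cs [] ((res ++ hwWrapA words cur) ++ [c]) := by
        simp [hwLoopA, hcsep]
      have hdrop' : text.drop (pos + cur.length + 1) = [] ++ cs := by
        have : text.drop (pos + cur.length + 1) = (text.drop pos).drop (cur.length + 1) := by
          rw [List.drop_drop]; ring_nf
        rw [this, hdrop]
        simp
      rw [hA, ih [] _ (pos + cur.length + 1) (by simp) (by simp) hnulcs' hdrop']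
      rw [show ([] : List Char) ++ hwMaskB cs = hwMaskB cs from rfl, hq,
        hw_get_boundary text cur cs c pos hdrop, hw_wrap_eq_mark]
      simp
    · -- non-separator: A appends c to the current word; B's part keeps growing
      have hcnul : ¬ c = '\x00' := fun he => hnulcs (by simp [he])
      have hmask : hwMaskB (c :: cs) = c :: hwMaskB cs := by
        simp only [hwMaskB, List.map_cons, if_neg (hw_seps_eq ▸ hcsep)]
      have hA : hwLoopA words (c :: cs) cur res = hwLoopA words cs (cur ++ [c]) res := by
        simp [hwLoopA, hcsep]
      rw [hmask, hA,
        ih (cur ++ [c]) res pos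
          (by intro x hx
              rcases List.mem_append.mp hx with h | h
              · exact hsep x h
              · simp at h; subst h; exact hcsep)
          (by intro hm
              rcases List.mem_append.mp hm with h | h
              · exact hnul h
              · simp at h; exact hcnul h.symm)
          hnulcs'
          (by rw [hdrop]; simp)]
      simp

-- ===== VERDICT (by name: the statement is the Claim_ definition above) =====
theorem highlight_words_py_spec : Claim_equal_highlight_words_py := by
  intro text words hdom
  show highlight_words_py text words = highlight_words_py_alt text words
  have hnul : '\x00' ∉ text.toList := by
    intro hm
    have hall : pvDomStr text = true := by
      have := (Bool.and_eq_true _ _).mp hdom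
      exact this.1
    have := List.all_eq_true.mp hall _ hm
    simp [pvDomChar] at this
  unfold highlight_words_py highlight_words_py_alt
  rw [hw_loop_eq_emit words text.toList text.toList [] [] 0 (by simp) (by simp) hnul (by simp)]
  simp
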